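-- pv_equiv track=rewrite | github.com/vygr/Python-PCB | view_mpl.py | split_paths
-- ===== SOURCE A (Python) =====
-- from itertools import izip, islice, chain
--
-- def split_paths(paths):
-- 	new_paths = []
-- 	for path in paths:
-- 		new_path = []
-- 		for a, b in izip(path, islice(path, 1, None)):
-- 			_, _, za = a
-- 			_, _, zb = b
-- 			if za != zb:
-- 				if new_path:
-- 					new_path.append(a)
-- 					new_paths.append(new_path)
-- 				new_paths.append([a, b])
-- 				new_path = []
-- 			else:
-- 				new_path.append(a)
-- 		if new_path:
-- 			new_path.append(path[-1])
-- 			new_paths.append(new_path)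
-- 	return new_paths
-- ===== SOURCE B (Python) =====
-- from itertools import groupby
--
-- def _zkey(p):
--     _, _, z = p
--     return z
--
-- def split_paths(paths):
--     new_paths = []
--     for path in paths:
--         runs = [list(g) for _, g in groupby(path, key=_zkey)]
--         for i, run in enumerate(runs):
--             if len(run) >= 2:
--                 new_paths.append(run)
--             if i + 1 < len(runs):
--                 new_paths.append([run[-1], runs[i + 1][0]])
--     return new_paths
-- ===== Notes on version B (the rewrite author's own statement) =====
-- stated objective: idiomatic
-- what changed: Replaces A's stateful pairwise scan with flush variable by an itertools.groupby grouping into maximal equal-z runs followed by a pass over consecutive runs emitting runs of length >= 2 and two-point transition segments.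
import Mathlib
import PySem

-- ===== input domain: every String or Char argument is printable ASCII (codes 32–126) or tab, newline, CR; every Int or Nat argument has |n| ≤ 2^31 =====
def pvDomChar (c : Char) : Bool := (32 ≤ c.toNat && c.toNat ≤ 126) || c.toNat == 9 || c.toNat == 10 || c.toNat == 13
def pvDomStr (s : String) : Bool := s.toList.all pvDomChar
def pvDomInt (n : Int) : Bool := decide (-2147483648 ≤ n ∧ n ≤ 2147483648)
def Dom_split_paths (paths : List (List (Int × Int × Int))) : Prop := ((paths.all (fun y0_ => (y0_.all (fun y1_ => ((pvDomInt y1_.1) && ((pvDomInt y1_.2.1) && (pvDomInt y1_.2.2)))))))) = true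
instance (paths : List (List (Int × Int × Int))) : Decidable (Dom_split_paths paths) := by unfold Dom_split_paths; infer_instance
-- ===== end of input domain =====

-- B replaces A's stateful pairwise scan by grouping each path into maximal
-- equal-z runs and then emitting run segments and transition pairs (idiomatic).

-- ===== PORT A =====
-- state = (new_path, new_paths); one step of A's inner pairwise loop
def stepA (st : List (Int × Int × Int) × List (List (Int × Int × Int)))
    (ab : (Int × Int × Int) × (Int × Int × Int)) :
    List (Int × Int × Int) × List (List (Int × Int × Int)) :=
  let a := ab.1
  let b := ab.2
  if a.2.2 ≠ b.2.2 then
    ([], (if st.1 ≠ [] then st.2 ++ [st.1 ++ [a]] else st.2) ++ [[a, b]])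
  else (st.1 ++ [a], st.2)

-- one iteration of A's outer loop: process one path, adding to new_paths
def procA (acc : List (List (Int × Int × Int))) (path : List (Int × Int × Int)) :
    List (List (Int × Int × Int)) :=
  let st := (path.zip (path.drop 1)).foldl stepA ([], acc)
  if st.1 ≠ [] then
    match PySem.List.pyGet? path (-1) with
    | some last => st.2 ++ [st.1 ++ [last]]
    | none => st.2
  else st.2

def split_paths (paths : List (List (Int × Int × Int))) : List (List (Int × Int × Int)) :=
  paths.foldl procA []

-- ===== PORT B =====
-- itertools.groupby with key z: maximal runs of equal z-coordinate
def groupRuns : List (Int × Int × Int) → List (List (Int × Int × Int))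
  | [] => []
  | [p] => [[p]]
  | p :: q :: rest =>
    match groupRuns (q :: rest) with
    | [] => [[p]]
    | g :: gs => if p.2.2 = q.2.2 then (p :: g) :: gs else [p] :: g :: gs

-- second pass of B: emit runs of length ≥ 2 and transitions between adjacent runs
def emitRuns : List (List (Int × Int × Int)) → List (List (Int × Int × Int))
  | [] => []
  | [g] => if 2 ≤ g.length then [g] else []
  | g :: g' :: rest =>
    (if 2 ≤ g.length then [g] else []) ++ [[g.getLast!, g'.head!]] ++ emitRuns (g' :: rest)

def split_paths_alt (paths : List (List (Int × Int × Int))) : List (List (Int × Int × Int)) :=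
  paths.flatMap (fun path => emitRuns (groupRuns path))

-- ===== PRECONDITION & SPEC =====
def Spec_split_paths (paths : List (List (Int × Int × Int))) (out : List (List (Int × Int × Int))) : Prop := out = split_paths_alt paths
instance (paths : List (List (Int × Int × Int))) (out : List (List (Int × Int × Int))) : Decidable (Spec_split_paths paths out) := by unfold Spec_split_paths; infer_instance

-- ===== CLAIM (what is proved, stated in full; the proofs are below) =====
def Claim_equal_split_paths : Prop := ∀ (paths : List (List (Int × Int × Int))), Dom_split_paths paths → Spec_split_paths paths (split_paths paths)

-- ===== LEMMAS AND PROOFS =====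

-- a nonempty path's first run starts with the path's head
theorem groupRuns_head : ∀ (rest : List (Int × Int × Int)) (q : Int × Int × Int),
    ∃ t gs, groupRuns (q :: rest) = (q :: t) :: gs := by
  intro rest
  induction rest with
  | nil => intro q; exact ⟨[], [], rfl⟩
  | cons r rs ih =>
    intro q
    obtain ⟨t, gs, h⟩ := ih r
    by_cases hz : q.2.2 = r.2.2
    · exact ⟨r :: t, gs, by simp [groupRuns, h, hz]⟩
    · exact ⟨[], (r :: t) :: gs, by simp [groupRuns, h, hz]⟩

theorem getLast!_append_singleton (np : List (Int × Int × Int)) (q : Int × Int × Int) :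
    (np ++ [q]).getLast! = q := by
  induction np with
  | nil => rfl
  | cons x xs ih =>
    simp only [List.cons_append, List.getLast!]
    cases h : xs ++ [q] with
    | nil => simp at h
    | cons y ys => simp_all [List.getLast!]

-- prepend a pending partial run onto the first run
def consHead (np : List (Int × Int × Int)) :
    List (List (Int × Int × Int)) → List (List (Int × Int × Int))
  | [] => []
  | g :: gs => (np ++ g) :: gs

-- main per-path invariant: A's pairwise loop + flush = B's run emission,
-- with the pending partial run np prepended to the first run
theorem mainA : ∀ (rest : List (Int × Int × Int)) (q : Int × Int × Int)
    (np : List (Int × Int × Int)) (acc : List (List (Int × Int × Int))),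
    (let st := (((q :: rest)).zip rest).foldl stepA (np, acc)
     if st.1 ≠ [] then
       match PySem.List.pyGet? (q :: rest) (-1) with
       | some last => st.2 ++ [st.1 ++ [last]]
       | none => st.2
     else st.2)
      = acc ++ emitRuns (consHead np (groupRuns (q :: rest))) := by
  intro rest
  induction rest with
  | nil =>
    intro q np acc
    simp only [List.zip_nil_right, List.foldl_nil, PySem.List.pyGet?_neg_one,
      List.getLast?_singleton, groupRuns, consHead, emitRuns]
    by_cases hnp : np = []
    · subst hnp; simp
    · simp [hnp]
  | cons r rs ih =>
    intro q np acc
    obtain ⟨t, gs, hruns⟩ := groupRuns_head rs r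
    have hlast : PySem.List.pyGet? (q :: r :: rs) (-1) = PySem.List.pyGet? (r :: rs) (-1) := by
      simp [PySem.List.pyGet?_neg_one]
    by_cases hz : q.2.2 = r.2.2
    · have hstep : stepA (np, acc) (q, r) = (np ++ [q], acc) := by
        simp [stepA, hz]
      have := ih r (np ++ [q]) acc
      simp only [List.zip_cons_cons, List.foldl_cons, hstep, hlast]
      rw [this]
      simp [groupRuns, hruns, hz, consHead]
    · have hstep : stepA (np, acc) (q, r) =
          ([], (if np ≠ [] then acc ++ [np ++ [q]] else acc) ++ [[q, r]]) := by
        simp [stepA, hz]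
      have := ih r [] ((if np ≠ [] then acc ++ [np ++ [q]] else acc) ++ [[q, r]])
      simp only [List.zip_cons_cons, List.foldl_cons, hstep, hlast]
      rw [this]
      simp only [groupRuns, hruns, hz, consHead, List.nil_append]
      have hL : (np ++ [q]).getLast! = q := getLast!_append_singleton np q
      by_cases hnp : np = []
      · subst hnp; simp [emitRuns]
      · have h1 : 1 ≤ np.length := by cases np with
          | nil => exact absurd rfl hnp
          | cons x xs => simp
        simp [hnp, h1, emitRuns]

theorem procA_eq (acc : List (List (Int × Int × Int))) (path : List (Int × Int × Int)) :
    procA acc path = acc ++ emitRuns (groupRuns path) := by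
  cases path with
  | nil => simp [procA, groupRuns, emitRuns]
  | cons q rest =>
    obtain ⟨t, gs, hruns⟩ := groupRuns_head rest q
    have := mainA rest q [] acc
    simpa [procA, hruns, consHead] using this

theorem foldl_procA : ∀ (paths : List (List (Int × Int × Int)))
    (acc : List (List (Int × Int × Int))),
    paths.foldl procA acc = acc ++ paths.flatMap (fun path => emitRuns (groupRuns path)) := by
  intro paths
  induction paths with
  | nil => simp
  | cons p ps ih =>
    intro acc
    simp only [List.foldl_cons, List.flatMap_cons, ih, procA_eq, List.append_assoc]

-- ===== VERDICT (by name: the statement is the Claim_ definition above) =====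
theorem split_paths_spec : Claim_equal_split_paths := by
  intro paths _
  unfold Spec_split_paths split_paths split_paths_alt
  simpa using foldl_procA paths []
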